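-- pv_equiv track=rewrite | github.com/Abhi-Balijepalli/QGIS-image-recognition | utils.py | SpaceText
-- ===== SOURCE A (Python) =====
-- def SpaceText(val,num_chars,first_char,last_char):
--     text = str(val)
--     for i in range(len(text),num_chars):
--         if i%2 == 0:
--             text = text+" "
--         else:
--             text = " "+text
--     return first_char+text+last_char
-- ===== SOURCE B (Python) =====
-- def SpaceText(val, num_chars, first_char, last_char):
--     text = str(val)
--     total = max(0, num_chars - len(text))
--     # indices len(text)..num_chars-1: even ones appended a space on the right,
--     # odd ones prepended one on the left
--     n_right = (total + 1) // 2 if len(text) % 2 == 0 else total // 2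
--     n_left = total - n_right
--     return first_char + " " * n_left + text + " " * n_right + last_char
-- ===== Notes on version B (the rewrite author's own statement) =====
-- stated objective: faster
-- what changed: Replaced the alternating side-by-side concatenation loop with a closed-form parity count of the padding indices and two single space-block builds.
import Mathlib
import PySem

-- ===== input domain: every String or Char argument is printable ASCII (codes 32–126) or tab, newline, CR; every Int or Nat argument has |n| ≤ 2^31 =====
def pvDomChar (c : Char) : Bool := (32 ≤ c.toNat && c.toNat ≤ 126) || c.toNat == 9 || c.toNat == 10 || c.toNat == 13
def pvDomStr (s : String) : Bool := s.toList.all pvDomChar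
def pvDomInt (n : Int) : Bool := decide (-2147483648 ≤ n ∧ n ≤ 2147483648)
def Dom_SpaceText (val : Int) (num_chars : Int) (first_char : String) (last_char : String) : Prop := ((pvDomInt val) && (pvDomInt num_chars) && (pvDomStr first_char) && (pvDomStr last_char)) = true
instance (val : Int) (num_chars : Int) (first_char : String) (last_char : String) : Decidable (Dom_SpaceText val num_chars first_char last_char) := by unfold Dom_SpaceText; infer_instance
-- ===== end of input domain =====

-- B replaces A's quadratic alternating-concatenation loop by a closed-form parity
-- count of the padding indices, building each side's space block once (objective: faster).

-- ===== PORT A =====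
def SpaceText (val : Int) (num_chars : Int) (first_char : String) (last_char : String) : String :=
  let text := PySem.Int.toStr val
  let text := (PySem.List.pyRange (PySem.Str.len text) num_chars 1).foldl
      (fun t i => if PySem.Int.mod i 2 == 0 then t ++ " " else " " ++ t) text
  first_char ++ text ++ last_char

-- ===== PORT B =====
def SpaceText_alt (val : Int) (num_chars : Int) (first_char : String) (last_char : String) : String :=
  let text := PySem.Int.toStr val
  let total := max 0 (num_chars - PySem.Str.len text)
  let nRight := if PySem.Int.mod (PySem.Str.len text) 2 == 0
                then PySem.Int.floordiv (total + 1) 2 else PySem.Int.floordiv total 2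
  let nLeft := total - nRight
  first_char ++ String.ofList (List.replicate nLeft.toNat ' ') ++ text
    ++ String.ofList (List.replicate nRight.toNat ' ') ++ last_char

-- ===== PRECONDITION & SPEC =====
def Spec_SpaceText (val : Int) (num_chars : Int) (first_char : String) (last_char : String) (out : String) : Prop := out = SpaceText_alt val num_chars first_char last_char
instance (val : Int) (num_chars : Int) (first_char : String) (last_char : String) (out : String) : Decidable (Spec_SpaceText val num_chars first_char last_char out) := by unfold Spec_SpaceText; infer_instance

-- ===== CLAIM (what is proved, stated in full; the proofs are below) =====
def Claim_equal_SpaceText : Prop := ∀ (val : Int) (num_chars : Int) (first_char : String) (last_char : String), Dom_SpaceText val num_chars first_char last_char → Spec_SpaceText val num_chars first_char last_char (SpaceText val num_chars first_char last_char)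

-- ===== LEMMAS AND PROOFS =====

-- number of even indices among a, a+1, …, a+n-1 (these pad on the right in A)
def nRightCount (n : Nat) (a : Int) : Nat := if a % 2 = 0 then (n + 1) / 2 else n / 2

lemma spaceLoop (n : Nat) : ∀ (a : Int) (t : String),
    ((PySem.List.pyRange a (a + n) 1).foldl
        (fun s i => if PySem.Int.mod i 2 == 0 then s ++ " " else " " ++ s) t).toList
      = List.replicate (n - nRightCount n a) ' ' ++ t.toList
          ++ List.replicate (nRightCount n a) ' ' := by
  induction n with
  | zero =>
    intro a t
    rw [show a + (0 : Nat) = a by push_cast; ring, PySem.List.pyRange_one_eq_nil le_rfl]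
    simp [nRightCount]
  | succ n ih =>
    intro a t
    have hlt : a < a + ((n : Nat) + 1 : Nat) := by push_cast; omega
    rw [PySem.List.pyRange_one_cons hlt, List.foldl_cons,
        show a + ((n : Nat) + 1 : Nat) = (a + 1) + (n : Nat) by push_cast; ring, ih (a + 1)]
    have hm : PySem.Int.mod a 2 = a % 2 := by
      simp [PySem.Int.mod, Int.fmod_eq_emod]
    have key : ∀ (m : Nat) (xs : List Char),
        List.replicate m ' ' ++ ' ' :: xs = ' ' :: (List.replicate m ' ' ++ xs) := by
      intro m xs
      rw [show List.replicate m ' ' ++ ' ' :: xs = (List.replicate m ' ' ++ [' ']) ++ xs by simp,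
          ← List.replicate_succ', List.replicate_succ, List.cons_append]
    by_cases h : a % 2 = 0
    · have e1 : nRightCount (n + 1) a = nRightCount n (a + 1) + 1 := by
        have h1 : ¬ ((a + 1) % 2 = 0) := by omega
        simp [nRightCount, h, h1]; try omega
      have e3 : n + 1 - (nRightCount n (a + 1) + 1) = n - nRightCount n (a + 1) := by omega
      simp only [hm, h, beq_self_eq_true, if_true, e1, e3]
      simp [List.replicate_succ', key]
    · have h1 : (a + 1) % 2 = 0 := by omega
      have e1 : nRightCount (n + 1) a = nRightCount n (a + 1) := by
        simp [nRightCount, h, h1]; try omega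
      have hk : nRightCount n (a + 1) ≤ n := by
        simp [nRightCount, h1]; try omega
      have e2 : n + 1 - nRightCount n (a + 1) = (n - nRightCount n (a + 1)) + 1 := by omega
      have hb : (PySem.Int.mod a 2 == 0) = false := by
        rw [hm]; simpa using h
      simp only [hb, Bool.false_eq_true, if_false, e1, e2]
      simp [List.replicate_succ, key]
lemma floordiv_two_toNat (m : Int) (h : 0 ≤ m) :
    (PySem.Int.floordiv m 2).toNat = m.toNat / 2 := by
  simp [PySem.Int.floordiv, Int.fdiv_eq_ediv]; omega

theorem SpaceText_spec : Claim_equal_SpaceText := by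
  intro val num_chars first_char last_char _
  unfold Spec_SpaceText SpaceText SpaceText_alt
  dsimp only
  refine String.toList_inj.mp ?_
  set t := PySem.Int.toStr val with ht
  have hL : PySem.Str.len t = (t.toList.length : Int) := by simp [PySem.Str.len_eq]
  have hm : PySem.Int.mod (PySem.Str.len t) 2 = PySem.Str.len t % 2 := by
    simp [PySem.Int.mod, Int.fmod_eq_emod]
  rcases (by omega : num_chars ≤ PySem.Str.len t ∨ PySem.Str.len t < num_chars) with hle | hlt
  · rw [PySem.List.pyRange_one_eq_nil hle]
    have h0 : max 0 (num_chars - PySem.Str.len t) = 0 := by omega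
    rw [h0]
    cases (PySem.Int.mod (PySem.Str.len t) 2 == 0) <;> simp
  · set n := (num_chars - PySem.Str.len t).toNat with hn
    have hb : num_chars = PySem.Str.len t + (n : Int) := by omega
    rw [hb]
    have hmax : max 0 (PySem.Str.len t + (n : Int) - PySem.Str.len t) = (n : Int) := by omega
    rw [hmax]
    by_cases hp : ((t.length : Int) % 2 = 0)
    · have hc : (PySem.Int.mod (PySem.Str.len t) 2 == 0) = true := by rw [hm]; simpa using hp
      have hR : (PySem.Int.floordiv ((n : Int) + 1) 2).toNat = nRightCount n (PySem.Str.len t) := by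
        rw [show ((n : Int) + 1) = ((n + 1 : Nat) : Int) by push_cast; ring,
            floordiv_two_toNat _ (by positivity)]
        simp [nRightCount, hp]
      have hLft : ((n : Int) - PySem.Int.floordiv ((n : Int) + 1) 2).toNat
          = n - nRightCount n (PySem.Str.len t) := by
        have h1 : 0 ≤ PySem.Int.floordiv ((n : Int) + 1) 2 := by
          simp [PySem.Int.floordiv, Int.fdiv_eq_ediv]; omega
        have h2 : PySem.Int.floordiv ((n : Int) + 1) 2 ≤ (n : Int) := by
          simp [PySem.Int.floordiv, Int.fdiv_eq_ediv]; omega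
        omega
      simp only [String.toList_append, String.toList_ofList, hc, if_true]
      rw [spaceLoop n (PySem.Str.len t) t, hR, hLft]
      simp [List.append_assoc]
    · have hc : (PySem.Int.mod (PySem.Str.len t) 2 == 0) = false := by rw [hm]; simpa using hp
      have hR : (PySem.Int.floordiv (n : Int) 2).toNat = nRightCount n (PySem.Str.len t) := by
        rw [floordiv_two_toNat _ (by positivity)]
        simp [nRightCount, hp]
      have hLft : ((n : Int) - PySem.Int.floordiv (n : Int) 2).toNat
          = n - nRightCount n (PySem.Str.len t) := by
        have h1 : 0 ≤ PySem.Int.floordiv (n : Int) 2 := by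
          simp [PySem.Int.floordiv, Int.fdiv_eq_ediv]; omega
        have h2 : PySem.Int.floordiv (n : Int) 2 ≤ (n : Int) := by
          simp [PySem.Int.floordiv, Int.fdiv_eq_ediv]; omega
        omega
      simp only [String.toList_append, String.toList_ofList, hc, Bool.false_eq_true, if_false]
      rw [spaceLoop n (PySem.Str.len t) t, hR, hLft]
      simp [List.append_assoc]
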